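-- pv_equiv track=rewrite | github.com/DynamicEV21/CrabQuant | crabquant/refinement/tier1_diagnostics.py | compute_consecutive_modify_params
-- ===== SOURCE A (Python) =====
-- def compute_consecutive_modify_params(history: list[dict]) -> int:
--     """Count consecutive modify_params actions at the end of history.
--
--     Used by the cosmetic improvement guard to force structural intervention.
--
--     Args:
--         history: List of history dicts from RunState.
--
--     Returns:
--         Number of consecutive modify_params at the tail of history.
--     """
--     if not history:
--         return 0
--
--     count = 0
--     for entry in reversed(history):
--         if entry.get("action") == "modify_params":
--             count += 1
--         else:
--             break
--     return count
-- ===== SOURCE B (Python) =====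
-- def compute_consecutive_modify_params(history: list[dict]) -> int:
--     """Single forward pass: increment on modify_params, reset otherwise."""
--     count = 0
--     for entry in history:
--         if entry.get("action") == "modify_params":
--             count += 1
--         else:
--             count = 0
--     return count
-- ===== Notes on version B (the rewrite author's own statement) =====
-- stated objective: alternative
-- what changed: Replaced the reversed early-breaking tail scan with one forward pass that increments a counter on modify_params and resets it to 0 otherwise; the final counter equals the trailing run length and the empty-history guard disappears.
import Mathlib
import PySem

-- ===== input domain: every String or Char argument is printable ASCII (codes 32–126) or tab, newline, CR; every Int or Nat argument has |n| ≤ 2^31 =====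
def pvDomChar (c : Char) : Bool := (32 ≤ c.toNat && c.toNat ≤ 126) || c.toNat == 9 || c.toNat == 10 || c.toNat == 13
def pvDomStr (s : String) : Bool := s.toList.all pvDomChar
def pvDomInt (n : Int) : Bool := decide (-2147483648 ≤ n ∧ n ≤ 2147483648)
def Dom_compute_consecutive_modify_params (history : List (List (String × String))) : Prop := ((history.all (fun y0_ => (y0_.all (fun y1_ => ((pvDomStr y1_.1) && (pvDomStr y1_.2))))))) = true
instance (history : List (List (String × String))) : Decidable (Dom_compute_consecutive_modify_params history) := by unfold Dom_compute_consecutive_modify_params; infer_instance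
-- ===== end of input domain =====

-- B replaces A's reversed early-breaking scan by one forward pass with a reset counter (alternative decomposition).

-- ===== PORT A =====
-- the reversed loop with break: count a prefix of the reversed list
def pvCountPrefixA (l : List (List (String × String))) : Int :=
  match l with
  | [] => 0
  | entry :: rest =>
    if (PySem.Dict.mk entry).get? "action" == some "modify_params" then
      1 + pvCountPrefixA rest
    else 0

def compute_consecutive_modify_params (history : List (List (String × String))) : Int :=
  if history = [] then 0
  else pvCountPrefixA history.reverse

-- ===== PORT B =====
def compute_consecutive_modify_params_alt (history : List (List (String × String))) : Int :=
  history.foldl (fun count entry =>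
    if (PySem.Dict.mk entry).get? "action" == some "modify_params" then count + 1 else 0) 0

-- ===== PRECONDITION & SPEC =====
def Spec_compute_consecutive_modify_params (history : List (List (String × String))) (out : Int) : Prop := out = compute_consecutive_modify_params_alt history
instance (history : List (List (String × String))) (out : Int) : Decidable (Spec_compute_consecutive_modify_params history out) := by unfold Spec_compute_consecutive_modify_params; infer_instance

-- ===== CLAIM (what is proved, stated in full; the proofs are below) =====
def Claim_equal_compute_consecutive_modify_params : Prop := ∀ (history : List (List (String × String))), Dom_compute_consecutive_modify_params history → Spec_compute_consecutive_modify_params history (compute_consecutive_modify_params history)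

-- ===== LEMMAS AND PROOFS =====

theorem pvFoldl_eq_countPrefix_reverse (l : List (List (String × String))) :
    (l.foldl (fun count entry =>
      if (PySem.Dict.mk entry).get? "action" == some "modify_params" then count + 1 else 0) 0)
    = pvCountPrefixA l.reverse := by
  induction l using List.reverseRecOn with
  | nil => rfl
  | append_singleton xs x ih =>
    rw [List.foldl_append, List.reverse_append]
    simp only [List.foldl_cons, List.foldl_nil, List.reverse_singleton, List.singleton_append,
      pvCountPrefixA]
    rw [ih]
    split <;> omega

theorem compute_consecutive_modify_params_spec : Claim_equal_compute_consecutive_modify_params := by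
  intro history _
  unfold Spec_compute_consecutive_modify_params compute_consecutive_modify_params
    compute_consecutive_modify_params_alt
  rw [pvFoldl_eq_countPrefix_reverse]
  cases history <;> simp [pvCountPrefixA]
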